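-- pv_equiv track=rewrite | github.com/VadimP22/Informatics_Lab4 | python/2/tests.py | count_of_correct_sentences
-- ===== SOURCE A (Python) =====
-- def count_of_correct_sentences(text):
--
--     commas = 0
--     sentences = 0
--
--     for char in text:
--         if char == ",":
--             commas = commas + 1
--
--         if (char == ".") or (char == "!") or (char == "?"):
--             if commas >= 2:
--                 sentences = sentences + 1
--
--             commas = 0
--
--     return sentences
-- ===== SOURCE B (Python) =====
-- def count_of_correct_sentences(text):
--     # Split the text into explicit sentence segments (text before each '.'/'!'/'?';
--     # trailing unterminated text never forms a segment), then count the segments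
--     # containing at least two commas.
--     segments = []
--     current = ""
--     for ch in text:
--         if ch in ".!?":
--             segments.append(current)
--             current = ""
--         else:
--             current += ch
--     return sum(1 for seg in segments if seg.count(",") >= 2)
-- ===== Notes on version B (the rewrite author's own statement) =====
-- stated objective: alternative
-- what changed: Replaces A's single-pass running comma-counter state machine by explicit segmentation: build the list of sentence segments (text before each '.'/'!'/'?', trailing unterminated text dropped), then count the segments with at least two commas.
import Mathlib
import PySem

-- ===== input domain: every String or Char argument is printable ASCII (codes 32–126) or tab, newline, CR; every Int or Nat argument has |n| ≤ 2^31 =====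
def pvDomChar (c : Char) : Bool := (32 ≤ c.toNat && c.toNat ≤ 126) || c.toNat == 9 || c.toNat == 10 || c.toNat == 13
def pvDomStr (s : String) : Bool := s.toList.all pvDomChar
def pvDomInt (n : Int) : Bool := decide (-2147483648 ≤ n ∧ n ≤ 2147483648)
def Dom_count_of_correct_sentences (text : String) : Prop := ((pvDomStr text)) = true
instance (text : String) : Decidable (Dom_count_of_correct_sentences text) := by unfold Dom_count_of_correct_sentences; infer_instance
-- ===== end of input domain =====

-- B replaces A's running comma-counter state machine by explicit segmentation
-- (collect each sentence segment, then count segments with ≥ 2 commas); alternative, not faster.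

-- ===== PORT A =====
-- literal port of A: one pass, running comma counter reset at each terminator
def pvStepA (st : Int × Int) (c : Char) : Int × Int :=
  let commas := if c == ',' then st.1 + 1 else st.1
  if c == '.' || c == '!' || c == '?' then
    (0, if commas ≥ 2 then st.2 + 1 else st.2)
  else
    (commas, st.2)

def count_of_correct_sentences (text : String) : Int :=
  (text.toList.foldl pvStepA (0, 0)).2

-- ===== PORT B =====
-- literal port of B: build the list of sentence segments, then count those with ≥ 2 commas
def pvStepB (st : List (List Char) × List Char) (c : Char) : List (List Char) × List Char :=
  if c == '.' || c == '!' || c == '?' then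
    (st.1 ++ [st.2], [])
  else
    (st.1, st.2 ++ [c])

def count_of_correct_sentences_alt (text : String) : Int :=
  let st := text.toList.foldl pvStepB ([], [])
  ((st.1.countP (fun seg => decide (2 ≤ PySem.Chars.count seg [','])) : Nat) : Int)

-- ===== PRECONDITION & SPEC =====
def Spec_count_of_correct_sentences (text : String) (out : Int) : Prop := out = count_of_correct_sentences_alt text
instance (text : String) (out : Int) : Decidable (Spec_count_of_correct_sentences text out) := by unfold Spec_count_of_correct_sentences; infer_instance

-- ===== CLAIM (what is proved, stated in full; the proofs are below) =====
def Claim_equal_count_of_correct_sentences : Prop := ∀ (text : String), Dom_count_of_correct_sentences text → Spec_count_of_correct_sentences text (count_of_correct_sentences text)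

-- ===== LEMMAS AND PROOFS =====

-- seg.count(",") is the plain character count of ','
theorem pv_count_go_comma (cs : List Char) : ∀ (fuel acc : Nat), cs.length ≤ fuel →
    PySem.Chars.count.go [','] fuel cs acc = acc + cs.count ',' := by
  induction cs with
  | nil => intro fuel acc _; cases fuel <;> simp [PySem.Chars.count.go]
  | cons c t ih =>
    intro fuel acc h
    cases fuel with
    | zero => simp at h
    | succ f =>
      simp only [PySem.Chars.count.go, List.isPrefixOf]
      by_cases hc : ',' = c
      · subst hc
        simp only [BEq.rfl, Bool.true_and, if_pos]
        rw [show List.drop [','].length (',' :: t) = t from rfl]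
        rw [ih f (acc + 1) (by simpa using h)]
        simp
        omega
      · rw [if_neg (by simp [hc])]
        rw [ih f acc (by simpa using h)]
        have hc' : ¬ c = ',' := fun hcc => hc hcc.symm
        simp [hc']

theorem pv_count_comma (cs : List Char) :
    PySem.Chars.count cs [','] = cs.count ',' := by
  simpa using pv_count_go_comma cs cs.length 0 le_rfl

-- B's segment list from state (segs, cur) is segs ++ (segments from ([], cur))
theorem pv_stepB_append (cs : List Char) : ∀ (segs : List (List Char)) (cur : List Char),
    (cs.foldl pvStepB (segs, cur)).1 = segs ++ (cs.foldl pvStepB ([], cur)).1 := by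
  induction cs with
  | nil => intro segs cur; simp
  | cons c t ih =>
    intro segs cur
    by_cases h : (c == '.' || c == '!' || c == '?') = true
    · simp only [List.foldl_cons, pvStepB, h, if_pos, List.nil_append]
      rw [ih (segs ++ [cur]) [], ih [cur] []]
      simp
    · simp only [List.foldl_cons, pvStepB, h]
      rw [if_neg (by simp_all), if_neg (by simp_all)]
      exact ih segs (cur ++ [c])

-- main invariant: A's running counter equals comma count of the current segment
theorem pv_main (cs : List Char) : ∀ (cur : List Char) (sent : Int),
    (cs.foldl pvStepA ((cur.count ',' : Int), sent)).2
      = sent + (((cs.foldl pvStepB ([], cur)).1.countP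
          (fun seg => decide (2 ≤ PySem.Chars.count seg [','])) : Nat) : Int) := by
  induction cs with
  | nil => intro cur sent; simp
  | cons c t ih =>
    intro cur sent
    by_cases hterm : (c == '.' || c == '!' || c == '?') = true
    · have hc : (c == ',') = false := by
        by_contra hcc
        rw [Bool.not_eq_false, beq_iff_eq] at hcc
        subst hcc
        exact absurd hterm (by decide)
      simp only [List.foldl_cons, pvStepA, pvStepB, hterm, if_pos, hc, if_neg, Bool.false_eq_true,
        not_false_eq_true]
      simp only [List.nil_append]
      have h0 : (0 : Int) = (([] : List Char).count ',' : Int) := by simp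
      rw [h0, ih [] _]
      rw [pv_stepB_append t [cur] []]
      simp only [List.countP_append, List.countP_cons, List.countP_nil]
      rw [pv_count_comma]
      by_cases h2 : 2 ≤ cur.count ','
      · rw [if_pos (by exact_mod_cast h2)]
        simp [h2]
        ring
      · rw [if_neg (by exact_mod_cast h2)]
        simp [h2]
    · simp only [List.foldl_cons, pvStepA, pvStepB]
      rw [if_neg hterm, if_neg hterm]
      by_cases hc : c = ','
      · subst hc
        rw [if_pos (by decide)]
        have : ((cur.count ',' : Int) + 1) = ((cur ++ [',']).count ',' : Int) := by
          simp [List.count_append]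
        rw [this, ih]
      · rw [if_neg (by simp [hc])]
        have : ((cur.count ',' : Int)) = ((cur ++ [c]).count ',' : Int) := by
          simp [List.count_append, hc]
        rw [this, ih]

-- ===== VERDICT (by name: the statement is the Claim_ definition above) =====
theorem count_of_correct_sentences_spec : Claim_equal_count_of_correct_sentences := by
  intro text _
  unfold Spec_count_of_correct_sentences count_of_correct_sentences count_of_correct_sentences_alt
  have h0 : (0 : Int) = (([] : List Char).count ',' : Int) := by simp
  rw [show ((0 : Int), (0 : Int)) = ((([] : List Char).count ',' : Int), (0 : Int)) by simp]
  rw [pv_main text.toList [] 0]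
  simp
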